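-- pv_equiv track=rewrite | github.com/signalwire/signalwire-cpp | scripts/enumerate_surface.py | strip_strings
-- ===== SOURCE A (Python) =====
-- def strip_strings(line: str) -> str:
--     """Mask string/char literals with spaces so their braces don't confuse us."""
--     # Replace content inside double-quoted strings (respecting simple escapes).
--     result = []
--     i = 0
--     n = len(line)
--     while i < n:
--         c = line[i]
--         if c == '"':
--             result.append('"')
--             i += 1
--             while i < n:
--                 c = line[i]
--                 if c == "\\" and i + 1 < n:
--                     result.append("  ")
--                     i += 2
--                     continue
--                 if c == '"':
--                     result.append('"')
--                     i += 1
--                     break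
--                 result.append(" ")
--                 i += 1
--         elif c == "'":
--             result.append("'")
--             i += 1
--             while i < n:
--                 c = line[i]
--                 if c == "\\" and i + 1 < n:
--                     result.append("  ")
--                     i += 2
--                     continue
--                 if c == "'":
--                     result.append("'")
--                     i += 1
--                     break
--                 result.append(" ")
--                 i += 1
--         else:
--             result.append(c)
--             i += 1
--     return "".join(result)
-- ===== SOURCE B (Python) =====
-- def _close(line, q, i):
--     """Index of the unescaped closing quote q at/after i, or len(line) if none."""
--     n = len(line)
--     while i < n:
--         c = line[i]
--         if c == "\\" and i + 1 < n:
--             i += 2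
--         elif c == q:
--             return i
--         else:
--             i += 1
--     return n
--
--
-- def strip_strings(line: str) -> str:
--     """Mask string/char literals with spaces so their braces don't confuse us."""
--     # Every character between the delimiters masks to a space, so rebuild the
--     # line from verbatim slices plus bulk space runs between located delimiters.
--     n = len(line)
--     out = []
--     i = 0
--     while True:
--         dq = line.find('"', i)
--         sq = line.find("'", i)
--         cands = [x for x in (dq, sq) if x >= 0]
--         if not cands:
--             out.append(line[i:])
--             return "".join(out)
--         j = min(cands)
--         q = line[j]
--         out.append(line[i:j + 1])
--         k = _close(line, q, j + 1)
--         out.append(" " * (min(k, n) - j - 1))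
--         if k < n:
--             out.append(q)
--             i = k + 1
--         else:
--             return "".join(out)
-- ===== Notes on version B (the rewrite author's own statement) =====
-- stated objective: faster
-- what changed: B rebuilds the line from whole chunks: it locates the next quote with str.find, locates the literal's unescaped closing quote with a helper scan, copies the verbatim slice before the literal and emits the whole masked interior as one bulk space run, exploiting that every literal interior masks entirely to spaces; A instead emits character by character from nested state loops.
import Mathlib
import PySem

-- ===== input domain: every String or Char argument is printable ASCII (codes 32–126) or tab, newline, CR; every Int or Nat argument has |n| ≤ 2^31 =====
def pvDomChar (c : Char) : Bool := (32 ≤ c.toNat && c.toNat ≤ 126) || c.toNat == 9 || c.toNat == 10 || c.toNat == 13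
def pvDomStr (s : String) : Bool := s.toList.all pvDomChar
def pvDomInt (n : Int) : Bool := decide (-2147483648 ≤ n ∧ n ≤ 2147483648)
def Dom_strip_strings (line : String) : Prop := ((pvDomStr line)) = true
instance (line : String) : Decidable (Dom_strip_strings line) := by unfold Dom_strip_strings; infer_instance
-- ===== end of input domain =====

-- B rebuilds the line from whole chunks (verbatim slice, opening quote, one bulk space run,
-- closing quote) located by find-style helpers, instead of A's per-character state loops.

-- ===== PORT A =====
-- outer while loop / the two (identical up to the quote char) inner while loops, as mutual recursion
mutual
def pvAOuter : List Char → List Char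
  | [] => []
  | c :: rest =>
    if c = '"' then '"' :: pvAInner '"' rest
    else if c = '\'' then '\'' :: pvAInner '\'' rest
    else c :: pvAOuter rest
termination_by l => l.length
decreasing_by all_goals simp

def pvAInner (q : Char) : List Char → List Char
  | [] => []
  | c :: rest =>
    if c = '\\' ∧ rest ≠ [] then ' ' :: ' ' :: pvAInner q rest.tail
    else if c = q then q :: pvAOuter rest
    else ' ' :: pvAInner q rest
termination_by l => l.length
decreasing_by all_goals (simp [List.length_tail]; try omega)
end

def strip_strings (line : String) : String := String.ofList (pvAOuter line.toList)

-- ===== PORT B =====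
-- line.find('"'/'\'', i) + min, fused over the suffix: verbatim prefix up to the first quote,
-- plus the quote and the remaining suffix (none if there is no quote)
def pvSplitQuote : List Char → List Char × Option (Char × List Char)
  | [] => ([], none)
  | c :: r =>
    if c = '"' ∨ c = '\'' then ([], some (c, r))
    else
      let (p, t) := pvSplitQuote r
      (c :: p, t)

-- _close: interior length consumed before the unescaped closing quote, and the suffix
-- after the closing quote (none when the literal is unterminated)
def pvClose (q : Char) : List Char → Nat × Option (List Char)
  | [] => (0, none)
  | c :: r =>
    if c = '\\' ∧ r ≠ [] then
      let (k, t) := pvClose q r.tail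
      (k + 2, t)
    else if c = q then (0, some r)
    else
      let (k, t) := pvClose q r
      (k + 1, t)
termination_by l => l.length
decreasing_by all_goals (simp [List.length_tail]; try omega)

theorem pvSplitQuote_len : ∀ (l p : List Char) (q : Char) (r : List Char),
    pvSplitQuote l = (p, some (q, r)) → r.length < l.length := by
  intro l
  induction l with
  | nil => intro p q r h; simp [pvSplitQuote] at h
  | cons c rest ih =>
    intro p q r h
    by_cases hc : c = '"' ∨ c = '\''
    · simp [pvSplitQuote, hc] at h
      obtain ⟨-, -, h3⟩ := h
      subst h3; simp
    · simp [pvSplitQuote, hc] at h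
      have := ih (pvSplitQuote rest).1 q r (by rw [← h.2])
      simp; omega

theorem pvClose_len : ∀ (n : Nat) (l : List Char), l.length ≤ n → ∀ (q : Char) (rest : List Char),
    (pvClose q l).2 = some rest → rest.length < l.length := by
  intro n
  induction n with
  | zero =>
    intro l h q rest hr
    have : l = [] := List.eq_nil_of_length_eq_zero (Nat.le_zero.mp h)
    subst this; simp [pvClose] at hr
  | succ n ih =>
    intro l h q rest hr
    match l with
    | [] => simp [pvClose] at hr
    | c :: r =>
      have hrn : r.length ≤ n := by simp at h; omega
      have hrtn : r.tail.length ≤ n := le_trans (by simp [List.length_tail]) hrn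
      by_cases h1 : c = '\\' ∧ r ≠ []
      · simp [pvClose, h1] at hr
        have := ih r.tail hrtn q rest hr
        simp [List.length_tail] at this ⊢
        omega
      · by_cases h2 : c = q
        · subst h2
          simp [pvClose, h1] at hr
          subst hr; simp
        · simp [pvClose, h1, h2] at hr
          have := ih r hrn q rest hr
          simp; omega

def pvB (l : List Char) : List Char :=
  match hs : pvSplitQuote l with
  | (p, none) => p
  | (p, some (q, r)) =>
    match hc : pvClose q r with
    | (k, none) => p ++ q :: List.replicate k ' '
    | (k, some rest) => p ++ q :: (List.replicate k ' ' ++ q :: pvB rest)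
termination_by l.length
decreasing_by
  have h1 := pvSplitQuote_len l p q r hs
  have h2 := pvClose_len r.length r le_rfl q rest (by rw [hc])
  omega

def strip_strings_alt (line : String) : String := String.ofList (pvB line.toList)

-- ===== PRECONDITION & SPEC =====
def Spec_strip_strings (line : String) (out : String) : Prop := out = strip_strings_alt line
instance (line : String) (out : String) : Decidable (Spec_strip_strings line out) := by unfold Spec_strip_strings; infer_instance

-- ===== CLAIM (what is proved, stated in full; the proofs are below) =====
def Claim_equal_strip_strings : Prop := ∀ (line : String), Dom_strip_strings line → Spec_strip_strings line (strip_strings line)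

-- ===== LEMMAS AND PROOFS =====
theorem pvAOuter_split : ∀ (l : List Char),
    (∀ p, pvSplitQuote l = (p, none) → pvAOuter l = p) ∧
    (∀ p q r, pvSplitQuote l = (p, some (q, r)) → pvAOuter l = p ++ q :: pvAInner q r) := by
  intro l
  induction l with
  | nil =>
    refine ⟨?_, ?_⟩
    · intro p h; simp [pvSplitQuote] at h; subst h; simp [pvAOuter]
    · intro p q r h; simp [pvSplitQuote] at h
  | cons c rest ih =>
    by_cases hc : c = '"' ∨ c = '\''
    · refine ⟨?_, ?_⟩
      · intro p h; simp [pvSplitQuote, hc] at h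
      · intro p q r h
        simp [pvSplitQuote, hc] at h
        obtain ⟨hp, hq, hr⟩ := h
        rcases hc with hc | hc <;>
          simp [pvAOuter, hc, ← hp, ← hq, ← hr]
    · have hne1 : ¬ c = '"' := fun h => hc (Or.inl h)
      have hne2 : ¬ c = '\'' := fun h => hc (Or.inr h)
      refine ⟨?_, ?_⟩
      · intro p h
        simp [pvSplitQuote, hc] at h
        obtain ⟨hp, ht⟩ := h
        have := ih.1 (pvSplitQuote rest).1 (by rw [← ht])
        simp [pvAOuter, hne1, hne2, this, ← hp]
      · intro p q r h
        simp [pvSplitQuote, hc] at h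
        obtain ⟨hp, ht⟩ := h
        have := ih.2 (pvSplitQuote rest).1 q r (by rw [← ht])
        simp [pvAOuter, hne1, hne2, this, ← hp]

theorem pvAInner_close : ∀ (n : Nat) (l : List Char), l.length ≤ n → ∀ (q : Char),
    pvAInner q l = List.replicate (pvClose q l).1 ' ' ++
      (match (pvClose q l).2 with
       | none => []
       | some rest => q :: pvAOuter rest) := by
  intro n
  induction n with
  | zero =>
    intro l h q
    have : l = [] := List.eq_nil_of_length_eq_zero (Nat.le_zero.mp h)
    subst this; simp [pvAInner, pvClose]
  | succ n ih =>
    intro l h q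
    match l with
    | [] => simp [pvAInner, pvClose]
    | c :: r =>
      have hrn : r.length ≤ n := by simp at h; omega
      have hrtn : r.tail.length ≤ n := le_trans (by simp [List.length_tail]) hrn
      by_cases h1 : c = '\\' ∧ r ≠ []
      · obtain ⟨hc, hr0⟩ := h1; subst hc
        simp [pvAInner, pvClose, hr0, ih r.tail hrtn q, List.replicate_succ]
      · by_cases h2 : c = q
        · subst h2
          simp [pvAInner, pvClose, h1]
        · simp [pvAInner, pvClose, h1, h2, ih r hrn q, List.replicate_succ]

theorem pv_equiv : ∀ (n : Nat) (l : List Char), l.length ≤ n → pvAOuter l = pvB l := by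
  intro n
  induction n with
  | zero =>
    intro l h
    have : l = [] := List.eq_nil_of_length_eq_zero (Nat.le_zero.mp h)
    subst this
    simp [pvAOuter, pvB, pvSplitQuote]
  | succ n ih =>
    intro l h
    rw [pvB]
    split
    · next p hs => exact (pvAOuter_split l).1 p hs
    · rename_i p q r hs
      rw [(pvAOuter_split l).2 p q r hs]
      split
      · rename_i k hc
        rw [pvAInner_close r.length r le_rfl q, hc]
        simp
      · rename_i k rest hc
        have hrl := pvSplitQuote_len l p q r hs
        have hrestl := pvClose_len r.length r le_rfl q rest (by rw [hc])
        have : rest.length ≤ n := by omega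
        rw [pvAInner_close r.length r le_rfl q, hc]
        simp [ih rest this]

-- ===== VERDICT (by name: the statement is the Claim_ definition above) =====
theorem strip_strings_spec : Claim_equal_strip_strings := by
  intro line _
  unfold Spec_strip_strings strip_strings strip_strings_alt
  rw [pv_equiv line.toList.length line.toList le_rfl]
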